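-- pv_equiv track=rewrite | github.com/Eason815/EEG_Sleep_AI | 1split1.py | build_subject_groups
-- ===== SOURCE A (Python) =====
-- from collections import defaultdict
--
-- def subject_id_from_record(record_id):
--     # Sleep-EDF cassette filenames such as SC4031E0 belong to subject SC403.
--     return record_id[:5]
--
-- def build_subject_groups(valid_records):
--     subject_to_records = defaultdict(list)
--     for record_id, paths in sorted(valid_records.items()):
--         subject_id = subject_id_from_record(record_id)
--         subject_to_records[subject_id].append(
--             {
--                 "record_id": record_id,
--                 "psg": paths["psg"],
--                 "hyp": paths["hyp"],
--             }
--         )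
--     return dict(subject_to_records)
-- ===== SOURCE B (Python) =====
-- def subject_id_from_record(record_id):
--     # Sleep-EDF cassette filenames such as SC4031E0 belong to subject SC403.
--     return record_id[:5]
--
-- def build_subject_groups(valid_records):
--     rows = [
--         (subject_id_from_record(rid),
--          {"record_id": rid, "psg": paths["psg"], "hyp": paths["hyp"]})
--         for rid, paths in sorted(valid_records.items())
--     ]
--     return {
--         sid: [rec for s, rec in rows if s == sid]
--         for sid in dict.fromkeys(s for s, _ in rows)
--     }
-- ===== Notes on version B (the rewrite author's own statement) =====
-- stated objective: alternative
-- what changed: Replaces the defaultdict append-accumulation loop with a precomputed (subject, record) row list, an ordered key dedup via dict.fromkeys, and a dict comprehension that gathers each subject's records by filtering the rows.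
import Mathlib
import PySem

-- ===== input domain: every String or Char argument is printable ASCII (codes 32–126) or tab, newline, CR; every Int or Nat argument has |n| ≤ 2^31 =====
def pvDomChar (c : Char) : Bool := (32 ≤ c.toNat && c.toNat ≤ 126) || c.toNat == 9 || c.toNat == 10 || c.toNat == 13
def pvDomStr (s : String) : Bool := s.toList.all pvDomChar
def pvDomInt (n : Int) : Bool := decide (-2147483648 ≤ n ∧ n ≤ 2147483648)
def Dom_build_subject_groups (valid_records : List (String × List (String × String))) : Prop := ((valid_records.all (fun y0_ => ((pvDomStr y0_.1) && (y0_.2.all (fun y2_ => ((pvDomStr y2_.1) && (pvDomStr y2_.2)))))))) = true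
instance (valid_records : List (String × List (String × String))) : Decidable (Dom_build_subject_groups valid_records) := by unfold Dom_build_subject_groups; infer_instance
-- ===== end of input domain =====

-- B replaces A's defaultdict append-accumulation with an ordered dedup of subject ids plus a
-- per-subject filter over a precomputed row list (objective: alternative decomposition).

-- ===== PORT A =====
-- subject_id_from_record: record_id[:5]
def pvSubjId (record_id : String) : String :=
  String.ofList (PySem.List.slice record_id.toList none (some 5))

-- the trimmed record dict {"record_id": …, "psg": paths["psg"], "hyp": paths["hyp"]}
-- (paths["psg"]/paths["hyp"] raise KeyError when absent; Pre_ excludes that, so getD's default is never used)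
def pvRecDict (p : String × List (String × String)) : List (String × String) :=
  let paths := PySem.Dict.ofList p.2
  [("record_id", p.1), ("psg", paths.getD "psg" ""), ("hyp", paths.getD "hyp" "")]

def build_subject_groups (valid_records : List (String × List (String × String))) : List (String × List (List (String × String))) :=
  -- for record_id, paths in sorted(valid_records.items()): subject_to_records[sid].append({...})
  let items := PySem.List.sorted (PySem.Dict.ofList valid_records).items (fun p => p.1) false
  (items.foldl
    (fun d p => d.modify (pvSubjId p.1) [] (fun l => l ++ [pvRecDict p]))
    PySem.Dict.empty).items

-- ===== PORT B =====
def build_subject_groups_alt (valid_records : List (String × List (String × String))) : List (String × List (List (String × String))) :=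
  let rows := (PySem.List.sorted (PySem.Dict.ofList valid_records).items (fun p => p.1) false).map
    (fun p => (pvSubjId p.1, pvRecDict p))
  (PySem.List.dedup (rows.map (fun r => r.1))).map
    (fun sid => (sid, (rows.filter (fun r => r.1 == sid)).map (fun r => r.2)))

-- ===== PRECONDITION & SPEC =====
-- Pre_ excludes exactly the inputs on which the Python A raises KeyError: a paths dict missing "psg" or "hyp".
def Pre_build_subject_groups (valid_records : List (String × List (String × String))) : Prop :=
  ∀ p ∈ valid_records, "psg" ∈ p.2.map Prod.fst ∧ "hyp" ∈ p.2.map Prod.fst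
instance (valid_records : List (String × List (String × String))) : Decidable (Pre_build_subject_groups valid_records) := by unfold Pre_build_subject_groups; infer_instance
def pvWitness_build_subject_groups : (List (String × List (String × String))) :=
  [("SC4031E0", [("psg", "p1.edf"), ("hyp", "h1.edf")]),
   ("SC4032E0", [("psg", "p2.edf"), ("hyp", "h2.edf")])]

def Spec_build_subject_groups (valid_records : List (String × List (String × String))) (out : List (String × List (List (String × String)))) : Prop := out = build_subject_groups_alt valid_records
instance (valid_records : List (String × List (String × String))) (out : List (String × List (List (String × String)))) : Decidable (Spec_build_subject_groups valid_records out) := by unfold Spec_build_subject_groups; infer_instance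

-- ===== CLAIM (what is proved, stated in full; the proofs are below) =====
def Claim_equal_build_subject_groups : Prop := ∀ (valid_records : List (String × List (String × String))), Dom_build_subject_groups valid_records → Pre_build_subject_groups valid_records → Spec_build_subject_groups valid_records (build_subject_groups valid_records)

-- ===== LEMMAS AND PROOFS =====

theorem build_subject_groups_core (items : List (String × List (String × String))) :
    (items.foldl (fun d p => d.modify (pvSubjId p.1) [] (fun l => l ++ [pvRecDict p])) PySem.Dict.empty).items
      = (PySem.List.dedup ((items.map (fun p => (pvSubjId p.1, pvRecDict p))).map (fun r => r.1))).map
          (fun sid => (sid, ((items.map (fun p => (pvSubjId p.1, pvRecDict p))).filter (fun r => r.1 == sid)).map (fun r => r.2))) := by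
  set rows := items.map (fun p => (pvSubjId p.1, pvRecDict p)) with hrows
  have hfold :
      items.foldl (fun d p => d.modify (pvSubjId p.1) [] (fun l => l ++ [pvRecDict p])) PySem.Dict.empty
        = rows.foldl (fun d q => d.modify q.1 [] (fun l => l ++ [q.2])) PySem.Dict.empty := by
    rw [hrows, List.foldl_map]
  rw [hfold]
  have hnd : ((rows.foldl (fun d q => d.modify q.1 [] (fun l => l ++ [q.2])) PySem.Dict.empty)).keys.Nodup :=
    PySem.Dict.nodup_keys_foldl_modify_key rows Prod.fst [] (fun _ q l => l ++ [q.2])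
      PySem.Dict.empty (by simp [PySem.Dict.keys_empty])
  rw [PySem.Dict.items_eq_map_keys _ hnd []]
  have hkeys : ((rows.foldl (fun d q => d.modify q.1 [] (fun l => l ++ [q.2])) PySem.Dict.empty)).keys
      = PySem.List.dedup (rows.map (fun r => r.1)) := by
    have := PySem.Dict.keys_foldl_modify_key rows (Prod.fst) [] (fun _ q l => l ++ [q.2]) PySem.Dict.empty
    simpa [PySem.Dict.keys_empty, PySem.Set.update_nil_left, PySem.List.dedup_eq_ofList] using this
  rw [hkeys]
  refine List.map_congr_left (fun k _ => ?_)
  have := PySem.Dict.getD_foldl_modify_append rows PySem.Dict.empty k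
  simp only [PySem.Dict.getD_empty, List.nil_append] at this
  simp [this]

theorem build_subject_groups_eq_alt (valid_records : List (String × List (String × String))) :
    build_subject_groups valid_records = build_subject_groups_alt valid_records := by
  simp only [build_subject_groups, build_subject_groups_alt]
  exact build_subject_groups_core _

-- ===== VERDICT (by name: the statement is the Claim_ definition above) =====
theorem build_subject_groups_spec : Claim_equal_build_subject_groups := by
  intro valid_records _ _
  unfold Spec_build_subject_groups
  exact build_subject_groups_eq_alt valid_records
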